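-- pv_equiv track=rewrite | github.com/jrmerwin/lepton_mass_ratio | rmr_simulations.py | frozen_ring
-- ===== SOURCE A (Python) =====
-- def frozen_ring(size, cr, cc, half_width):
--     """
--     Generate frozen node IDs forming a square ring boundary.
--
--     Creates a cavity of interior size (2*half_width-1) × (2*half_width-1)
--     surrounded by a 1-node-thick frozen boundary.
--
--     Returns
--     -------
--     set of int : frozen node IDs
--     """
--     rh = half_width + 1  # ring at half_width+1 from center
--     ring = set()
--     for dr in range(-rh, rh + 1):
--         for dc in range(-rh, rh + 1):
--             if abs(dr) == rh or abs(dc) == rh: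
--                 r, c = cr + dr, cc + dc
--                 if 0 <= r < size and 0 <= c < size:
--                     ring.add(r * size + c)
--     return ring
-- ===== SOURCE B (Python) =====
-- def frozen_ring(size, cr, cc, half_width):
--     """Same ring, but visiting only the four boundary edges (O(rh) instead of O(rh^2))."""
--     rh = half_width + 1
--     if rh < 0:
--         return set()
--     ids = []
--
--     def add(r, c):
--         if 0 <= r < size and 0 <= c < size:
--             ids.append(r * size + c)
--
--     for c in range(cc - rh, cc + rh + 1):   # top edge
--         add(cr - rh, c)
--     for r in range(cr - rh + 1, cr + rh):   # left and right edges
--         add(r, cc - rh)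
--         add(r, cc + rh)
--     if rh > 0:                              # bottom edge (distinct from top only when rh > 0)
--         for c in range(cc - rh, cc + rh + 1):
--             add(cr + rh, c)
--     return set(ids)
-- ===== Notes on version B (the rewrite author's own statement) =====
-- stated objective: faster
-- what changed: Instead of scanning the full (2rh+1)x(2rh+1) square and testing each cell for being on the boundary, B walks only the four boundary edges (top row, the two side columns, bottom row) and collects in-bounds ids directly.
import Mathlib
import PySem

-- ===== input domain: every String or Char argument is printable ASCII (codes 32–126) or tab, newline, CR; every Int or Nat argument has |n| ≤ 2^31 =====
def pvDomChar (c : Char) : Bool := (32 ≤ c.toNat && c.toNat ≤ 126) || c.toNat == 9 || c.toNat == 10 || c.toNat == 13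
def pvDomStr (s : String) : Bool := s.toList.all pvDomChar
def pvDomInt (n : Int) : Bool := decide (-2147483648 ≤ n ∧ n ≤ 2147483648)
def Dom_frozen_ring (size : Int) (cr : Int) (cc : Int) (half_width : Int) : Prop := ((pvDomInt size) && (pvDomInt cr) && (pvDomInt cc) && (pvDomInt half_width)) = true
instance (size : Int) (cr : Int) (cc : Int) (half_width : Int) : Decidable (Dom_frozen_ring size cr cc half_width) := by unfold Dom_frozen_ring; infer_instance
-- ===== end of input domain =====

-- B walks only the four boundary edges instead of scanning the whole square: O(half_width) vs O(half_width^2).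

-- ===== PORT A =====
def frozen_ring (size : Int) (cr : Int) (cc : Int) (half_width : Int) : List Int :=
  let rh := half_width + 1
  (PySem.List.pyRange (-rh) (rh + 1) 1).foldl (fun ring dr =>
    (PySem.List.pyRange (-rh) (rh + 1) 1).foldl (fun ring dc =>
      if |dr| == rh || |dc| == rh then
        let r := cr + dr
        let c := cc + dc
        if 0 ≤ r ∧ r < size ∧ 0 ≤ c ∧ c < size then
          PySem.Set.add ring (r * size + c)
        else ring
      else ring) ring) PySem.Set.empty

-- ===== PORT B =====
-- helper 'add(r, c)' of Source B: append the node id when the cell is inside the grid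
def frAddCell (size : Int) (ids : List Int) (r : Int) (c : Int) : List Int :=
  if 0 ≤ r ∧ r < size ∧ 0 ≤ c ∧ c < size then ids ++ [r * size + c] else ids

def frozen_ring_alt (size : Int) (cr : Int) (cc : Int) (half_width : Int) : List Int :=
  let rh := half_width + 1
  if rh < 0 then PySem.Set.empty
  else
    -- top edge
    let ids := (PySem.List.pyRange (cc - rh) (cc + rh + 1) 1).foldl
      (fun ids c => frAddCell size ids (cr - rh) c) []
    -- left and right edges
    let ids := (PySem.List.pyRange (cr - rh + 1) (cr + rh) 1).foldl
      (fun ids r => frAddCell size (frAddCell size ids r (cc - rh)) r (cc + rh)) ids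
    -- bottom edge (distinct from the top only when rh > 0)
    let ids := if rh > 0 then
        (PySem.List.pyRange (cc - rh) (cc + rh + 1) 1).foldl
          (fun ids c => frAddCell size ids (cr + rh) c) ids
      else ids
    PySem.Set.ofList ids

-- ===== PRECONDITION & SPEC =====
def Spec_frozen_ring (size : Int) (cr : Int) (cc : Int) (half_width : Int) (out : List Int) : Prop := out = frozen_ring_alt size cr cc half_width
instance (size : Int) (cr : Int) (cc : Int) (half_width : Int) (out : List Int) : Decidable (Spec_frozen_ring size cr cc half_width out) := by unfold Spec_frozen_ring; infer_instance

-- ===== CLAIM (what is proved, stated in full; the proofs are below) =====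
def Claim_equal_frozen_ring : Prop := ∀ (size : Int) (cr : Int) (cc : Int) (half_width : Int), Dom_frozen_ring size cr cc half_width → Spec_frozen_ring size cr cc half_width (frozen_ring size cr cc half_width)

-- ===== LEMMAS AND PROOFS =====

-- range shift: range(t+a, t+b) = [t + x for x in range(a, b)]
theorem frRange_shift (t a b : Int) :
    PySem.List.pyRange (t + a) (t + b) 1 = (PySem.List.pyRange a b 1).map (fun x => t + x) := by
  rw [PySem.List.pyRange_one, PySem.List.pyRange_one, List.map_map]
  have hb : (t + b - (t + a)).toNat = (b - a).toNat := by omega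
  rw [hb]
  exact List.map_congr_left (fun k _ => by simp; ring)

-- Set.update distributes over ++
theorem frUpdate_append {α : Type} [BEq α] (s : PySem.Set α) (l1 l2 : List α) :
    PySem.Set.update s (l1 ++ l2) = PySem.Set.update (PySem.Set.update s l1) l2 := by
  simp [PySem.Set.update, List.foldl_append]

-- conditional Set.add loop = update with the filtered, mapped list
theorem frFoldl_setAdd_if (p : Int → Bool) (h : Int → Int) :
    ∀ (xs : List Int) (s : PySem.Set Int),
      xs.foldl (fun s x => if p x then PySem.Set.add s (h x) else s) s
        = PySem.Set.update s ((xs.filter p).map h) := by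
  intro xs
  induction xs with
  | nil => intro s; simp [PySem.Set.update]
  | cons a l ih =>
      intro s
      by_cases hp : p a
      · simp [hp, List.foldl_cons, ih, PySem.Set.update]
      · simp [hp, List.foldl_cons, ih]

-- loop of updates = one update with the concatenation
theorem frFoldl_update_flatMap (g : Int → List Int) :
    ∀ (xs : List Int) (s : PySem.Set Int),
      xs.foldl (fun s x => PySem.Set.update s (g x)) s = PySem.Set.update s (xs.flatMap g) := by
  intro xs
  induction xs with
  | nil => intro s; simp [PySem.Set.update]
  | cons a l ih => intro s; simp [List.foldl_cons, ih, frUpdate_append]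


-- the id of cell (cr+dr, cc+dc), and the in-grid test, as used by A
-- list of ids A's inner loop adds for a given dr (in order)
def frRowA (size cr cc rh dr : Int) : List Int :=
  ((PySem.List.pyRange (-rh) (rh + 1) 1).filter
      (fun dc => (|dr| == rh || |dc| == rh) &&
        decide (0 ≤ cr + dr ∧ cr + dr < size ∧ 0 ≤ cc + dc ∧ cc + dc < size))).map
    (fun dc => (cr + dr) * size + (cc + dc))

theorem frA_norm (size cr cc rh : Int) :
    (PySem.List.pyRange (-rh) (rh + 1) 1).foldl (fun ring dr =>
      (PySem.List.pyRange (-rh) (rh + 1) 1).foldl (fun ring dc =>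
        if |dr| == rh || |dc| == rh then
          if 0 ≤ cr + dr ∧ cr + dr < size ∧ 0 ≤ cc + dc ∧ cc + dc < size then
            PySem.Set.add ring ((cr + dr) * size + (cc + dc))
          else ring
        else ring) ring) PySem.Set.empty
    = PySem.Set.update PySem.Set.empty
        ((PySem.List.pyRange (-rh) (rh + 1) 1).flatMap (frRowA size cr cc rh)) := by
  have hinner : ∀ (dr : Int) (ring : PySem.Set Int),
      (PySem.List.pyRange (-rh) (rh + 1) 1).foldl (fun ring dc =>
        if |dr| == rh || |dc| == rh then
          if 0 ≤ cr + dr ∧ cr + dr < size ∧ 0 ≤ cc + dc ∧ cc + dc < size then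
            PySem.Set.add ring ((cr + dr) * size + (cc + dc))
          else ring
        else ring) ring
      = PySem.Set.update ring (frRowA size cr cc rh dr) := by
    intro dr ring
    have hbody : (fun (ring : PySem.Set Int) (dc : Int) =>
        if |dr| == rh || |dc| == rh then
          if 0 ≤ cr + dr ∧ cr + dr < size ∧ 0 ≤ cc + dc ∧ cc + dc < size then
            PySem.Set.add ring ((cr + dr) * size + (cc + dc))
          else ring
        else ring)
        = (fun (s : PySem.Set Int) (dc : Int) =>
            if ((|dr| == rh || |dc| == rh) &&
                decide (0 ≤ cr + dr ∧ cr + dr < size ∧ 0 ≤ cc + dc ∧ cc + dc < size))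
            then PySem.Set.add s ((cr + dr) * size + (cc + dc)) else s) := by
      funext s dc
      by_cases h1 : (|dr| == rh || |dc| == rh) = true
      · by_cases h2 : 0 ≤ cr + dr ∧ cr + dr < size ∧ 0 ≤ cc + dc ∧ cc + dc < size
        · simp [h1, h2]
        · simp [h1, h2]
      · simp [h1]
    rw [hbody, frFoldl_setAdd_if]
    rfl
  have houter : (fun (ring : PySem.Set Int) (dr : Int) =>
      (PySem.List.pyRange (-rh) (rh + 1) 1).foldl (fun ring dc =>
        if |dr| == rh || |dc| == rh then
          if 0 ≤ cr + dr ∧ cr + dr < size ∧ 0 ≤ cc + dc ∧ cc + dc < size then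
            PySem.Set.add ring ((cr + dr) * size + (cc + dc))
          else ring
        else ring) ring)
      = (fun (s : PySem.Set Int) (dr : Int) => PySem.Set.update s (frRowA size cr cc rh dr)) :=
    funext fun ring => funext fun dr => hinner dr ring
  rw [houter, frFoldl_update_flatMap]


-- the ids a single cell contributes (as used by B's add helper)
def frCell (size r c : Int) : List Int :=
  if 0 ≤ r ∧ r < size ∧ 0 ≤ c ∧ c < size then [r * size + c] else []

theorem frAddCell_eq (size : Int) (ids : List Int) (r c : Int) :
    frAddCell size ids r c = ids ++ frCell size r c := by
  unfold frAddCell frCell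
  split_ifs <;> simp

theorem frFlatMap_congr {f g : Int → List Int} :
    ∀ (l : List Int), (∀ x ∈ l, f x = g x) → l.flatMap f = l.flatMap g := by
  intro l
  induction l with
  | nil => intro; rfl
  | cons a t ih =>
      intro h
      simp only [List.flatMap_cons, h a (List.mem_cons_self), ih (fun x hx => h x (List.mem_cons_of_mem a hx))]

theorem frFilterMap_flatMap (p : Int → Bool) (q : Int → Prop) [DecidablePred q] (h : Int → Int) :
    ∀ (l : List Int),
      (l.filter (fun x => p x && decide (q x))).map h
        = l.flatMap (fun x => if p x then (if q x then [h x] else []) else []) := by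
  intro l
  induction l with
  | nil => rfl
  | cons a t ih =>
      by_cases h1 : p a
      · by_cases h2 : q a
        · simp [h1, h2, ih]
        · simp [h1, h2, ih]
      · simp [h1, ih]

-- frRowA as a flatMap of single-cell contributions
theorem frRowA_flatMap (size cr cc rh dr : Int) :
    frRowA size cr cc rh dr
      = (PySem.List.pyRange (-rh) (rh + 1) 1).flatMap
          (fun dc => if (|dr| == rh || |dc| == rh) then frCell size (cr + dr) (cc + dc) else []) := by
  unfold frRowA
  rw [frFilterMap_flatMap (fun dc => (|dr| == rh || |dc| == rh))
      (fun dc => 0 ≤ cr + dr ∧ cr + dr < size ∧ 0 ≤ cc + dc ∧ cc + dc < size)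
      (fun dc => (cr + dr) * size + (cc + dc))]
  exact frFlatMap_congr _ (fun dc _ => by unfold frCell; split_ifs <;> rfl)

-- B's side in closed list form
theorem frB_norm (size cr cc rh : Int) :
    PySem.Set.ofList
      ((if rh > 0 then
          (PySem.List.pyRange (cc - rh) (cc + rh + 1) 1).foldl
            (fun ids c => frAddCell size ids (cr + rh) c)
            ((PySem.List.pyRange (cr - rh + 1) (cr + rh) 1).foldl
              (fun ids r => frAddCell size (frAddCell size ids r (cc - rh)) r (cc + rh))
              ((PySem.List.pyRange (cc - rh) (cc + rh + 1) 1).foldl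
                (fun ids c => frAddCell size ids (cr - rh) c) []))
        else
          (PySem.List.pyRange (cr - rh + 1) (cr + rh) 1).foldl
            (fun ids r => frAddCell size (frAddCell size ids r (cc - rh)) r (cc + rh))
            ((PySem.List.pyRange (cc - rh) (cc + rh + 1) 1).foldl
              (fun ids c => frAddCell size ids (cr - rh) c) [])))
    = PySem.Set.ofList
        (((PySem.List.pyRange (cc - rh) (cc + rh + 1) 1).flatMap (fun c => frCell size (cr - rh) c)
          ++ (PySem.List.pyRange (cr - rh + 1) (cr + rh) 1).flatMap
              (fun r => frCell size r (cc - rh) ++ frCell size r (cc + rh)))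
          ++ (if rh > 0 then
                (PySem.List.pyRange (cc - rh) (cc + rh + 1) 1).flatMap (fun c => frCell size (cr + rh) c)
              else [])) := by
  have htop : ∀ (r0 : Int) (acc : List Int) (l : List Int),
      l.foldl (fun ids c => frAddCell size ids r0 c) acc = acc ++ l.flatMap (fun c => frCell size r0 c) := by
    intro r0 acc l
    have : (fun (ids : List Int) (c : Int) => frAddCell size ids r0 c)
        = (fun (ids : List Int) (c : Int) => ids ++ frCell size r0 c) := by
      funext ids c; exact frAddCell_eq size ids r0 c
    rw [this, PySem.List.foldl_append_eq_flatMap]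
  have hmid : ∀ (acc : List Int) (l : List Int),
      l.foldl (fun ids r => frAddCell size (frAddCell size ids r (cc - rh)) r (cc + rh)) acc
        = acc ++ l.flatMap (fun r => frCell size r (cc - rh) ++ frCell size r (cc + rh)) := by
    intro acc l
    have : (fun (ids : List Int) (r : Int) => frAddCell size (frAddCell size ids r (cc - rh)) r (cc + rh))
        = (fun (ids : List Int) (r : Int) => ids ++ (frCell size r (cc - rh) ++ frCell size r (cc + rh))) := by
      funext ids r
      rw [frAddCell_eq, frAddCell_eq, List.append_assoc]
    rw [this, PySem.List.foldl_append_eq_flatMap]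
  by_cases hpos : rh > 0
  · simp only [hpos, if_true, htop, hmid]
    simp
  · simp only [hpos, if_false, htop, hmid]
    simp


theorem frList_eq (size cr cc rh : Int) (h0 : 0 ≤ rh) :
    (PySem.List.pyRange (-rh) (rh + 1) 1).flatMap (frRowA size cr cc rh)
      = (((PySem.List.pyRange (cc - rh) (cc + rh + 1) 1).flatMap (fun c => frCell size (cr - rh) c)
          ++ (PySem.List.pyRange (cr - rh + 1) (cr + rh) 1).flatMap
              (fun r => frCell size r (cc - rh) ++ frCell size r (cc + rh)))
          ++ (if rh > 0 then
                (PySem.List.pyRange (cc - rh) (cc + rh + 1) 1).flatMap (fun c => frCell size (cr + rh) c)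
              else [])) := by
  have habs_neg : (|(-rh)| == rh) = true := by
    simp [abs_neg, abs_of_nonneg h0]
  have habs_pos : (|rh| == rh) = true := by
    simp [abs_of_nonneg h0]
  rcases eq_or_lt_of_le h0 with hz | hpos
  · -- rh = 0 : top row only; the middle range and the bottom edge are empty
    subst hz
    have hR : PySem.List.pyRange (-(0:Int)) ((0:Int) + 1) 1 = [0] := by
      rw [neg_zero]; exact PySem.List.pyRange_one_singleton 0
    have hT : PySem.List.pyRange (cc - 0) (cc + 0 + 1) 1 = [cc] := by
      rw [sub_zero, add_zero]; exact PySem.List.pyRange_one_singleton cc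
    have hM : PySem.List.pyRange (cr - 0 + 1) (cr + 0) 1 = [] :=
      PySem.List.pyRange_one_eq_nil (by omega)
    rw [hR, hT, hM]
    simp only [List.flatMap_cons, List.flatMap_nil, List.append_nil]
    rw [frRowA_flatMap, hR]
    simp [frCell]
  · -- rh ≥ 1 : split range(-rh, rh+1) into [-rh], range(-rh+1, rh), [rh]
    have hsplit : PySem.List.pyRange (-rh) (rh + 1) 1
        = [-rh] ++ PySem.List.pyRange (-rh + 1) rh 1 ++ [rh] := by
      rw [PySem.List.pyRange_one_append (-rh) (-rh + 1) (rh + 1) (by omega) (by omega),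
          PySem.List.pyRange_one_append (-rh + 1) rh (rh + 1) (by omega) (by omega),
          PySem.List.pyRange_one_singleton, PySem.List.pyRange_one_singleton]
      simp
    -- top edge
    have htopA : frRowA size cr cc rh (-rh)
        = (PySem.List.pyRange (cc - rh) (cc + rh + 1) 1).flatMap (fun c => frCell size (cr - rh) c) := by
      rw [frRowA_flatMap]
      have e1 : cc - rh = cc + -rh := by ring
      have e2 : cc + rh + 1 = cc + (rh + 1) := by ring
      rw [e1, e2, frRange_shift, List.flatMap_map]
      refine frFlatMap_congr _ (fun dc _ => ?_)
      have e3 : cr + -rh = cr - rh := by ring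
      rw [habs_neg]
      simp [e3]
    -- bottom edge
    have hbotA : frRowA size cr cc rh rh
        = (PySem.List.pyRange (cc - rh) (cc + rh + 1) 1).flatMap (fun c => frCell size (cr + rh) c) := by
      rw [frRowA_flatMap]
      have e1 : cc - rh = cc + -rh := by ring
      have e2 : cc + rh + 1 = cc + (rh + 1) := by ring
      rw [e1, e2, frRange_shift, List.flatMap_map]
      refine frFlatMap_congr _ (fun dc _ => ?_)
      rw [habs_pos]
      simp
    -- middle rows
    have hmidA : ∀ dr ∈ PySem.List.pyRange (-rh + 1) rh 1,
        frRowA size cr cc rh dr = frCell size (cr + dr) (cc - rh) ++ frCell size (cr + dr) (cc + rh) := by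
      intro dr hdr
      rw [PySem.List.mem_pyRange_one] at hdr
      have hne : (|dr| == rh) = false := by
        have : |dr| ≠ rh := by rcases abs_cases dr with ⟨h, _⟩ | ⟨h, _⟩ <;> omega
        simp [this]
      rw [frRowA_flatMap, hsplit]
      have hmidnil : (PySem.List.pyRange (-rh + 1) rh 1).flatMap
          (fun dc => if (|dr| == rh || |dc| == rh) then frCell size (cr + dr) (cc + dc) else []) = [] := by
        rw [List.flatMap_eq_nil_iff]
        intro dc hdc
        rw [PySem.List.mem_pyRange_one] at hdc
        have h1 : (|dc| == rh) = false := by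
          have : |dc| ≠ rh := by rcases abs_cases dc with ⟨h, _⟩ | ⟨h, _⟩ <;> omega
          simp [this]
        simp [hne, h1]
      simp only [List.flatMap_append, List.flatMap_cons, List.flatMap_nil, hmidnil]
      have e3 : cc + -rh = cc - rh := by ring
      simp only [hne, habs_neg, habs_pos, Bool.or_true, if_true,
        List.append_nil, e3]
    -- assemble both sides
    have hmidB : (PySem.List.pyRange (cr - rh + 1) (cr + rh) 1).flatMap
          (fun r => frCell size r (cc - rh) ++ frCell size r (cc + rh))
        = (PySem.List.pyRange (-rh + 1) rh 1).flatMap (frRowA size cr cc rh) := by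
      have e1 : cr - rh + 1 = cr + (-rh + 1) := by ring
      have e2 : cr + rh = cr + rh := rfl
      rw [e1, frRange_shift cr (-rh + 1) rh, List.flatMap_map]
      exact (frFlatMap_congr _ (fun dr hdr => (hmidA dr hdr).symm))
    rw [hsplit]
    simp only [List.flatMap_append, List.flatMap_cons, List.flatMap_nil, List.append_nil]
    rw [htopA, hbotA, hmidB, if_pos hpos]


-- ===== VERDICT (by name: the statement is the Claim_ definition above) =====
theorem frozen_ring_spec : Claim_equal_frozen_ring := by
  intro size cr cc half_width _dom
  unfold Spec_frozen_ring frozen_ring frozen_ring_alt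
  dsimp only
  by_cases hneg : half_width + 1 < 0
  · have hnil : PySem.List.pyRange (-(half_width + 1)) ((half_width + 1) + 1) 1 = [] :=
      PySem.List.pyRange_one_eq_nil (by omega)
    rw [hnil, if_pos hneg]
    rfl
  · rw [frA_norm size cr cc (half_width + 1), if_neg hneg, frB_norm,
      frList_eq size cr cc (half_width + 1) (by omega)]
    rfl
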